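-- pv_equiv track=rewrite | github.com/jjoshua2/arc_agi | dupes/97999447_group-056/test_correct/1330.py | transform
-- ===== SOURCE A (Python) =====
-- def transform(grid: list[list[int]]) -> list[list[int]]:
--     if not grid or not grid[0]:
--         return []
--     rows = len(grid)
--     cols = len(grid[0])
--     output = [row[:] for row in grid]
--     for r in range(rows):
--         for c in range(cols):
--             if grid[r][c] != 0:
--                 k = grid[r][c]
--                 for pos in range(c, cols):
--                     if (pos - c) % 2 == 0:
--                         output[r][pos] = k
--                     else:
--                         output[r][pos] = 5
--     return output
-- ===== SOURCE B (Python) =====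
-- def transform(grid: list[list[int]]) -> list[list[int]]:
--     if not grid or not grid[0]:
--         return []
--     cols = len(grid[0])
--     out = []
--     for row in grid:
--         new = row[:]
--         last_c = None
--         last_k = 0
--         for c in range(cols):
--             v = row[c]
--             if v != 0:
--                 last_c = c
--                 last_k = v
--             if last_c is not None:
--                 new[c] = last_k if (c - last_c) % 2 == 0 else 5
--         out.append(new)
--     return out
-- ===== Notes on version B (the rewrite author's own statement) =====
-- stated objective: faster
-- what changed: replaces the per-marker refill loop (each nonzero cell rewrites the rest of its row) by a single left-to-right pass per row that tracks the last nonzero column and value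
import Mathlib
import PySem

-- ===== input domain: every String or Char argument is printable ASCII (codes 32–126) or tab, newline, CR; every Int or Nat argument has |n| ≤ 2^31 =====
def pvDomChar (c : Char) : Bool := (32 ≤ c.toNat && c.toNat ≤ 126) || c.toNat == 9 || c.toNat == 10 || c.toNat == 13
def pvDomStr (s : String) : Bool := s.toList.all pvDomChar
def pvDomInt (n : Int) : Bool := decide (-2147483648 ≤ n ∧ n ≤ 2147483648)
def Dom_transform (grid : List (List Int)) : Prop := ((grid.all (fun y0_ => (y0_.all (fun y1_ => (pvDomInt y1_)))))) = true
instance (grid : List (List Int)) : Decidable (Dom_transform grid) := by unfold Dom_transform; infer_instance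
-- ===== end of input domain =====

-- B replaces A's per-marker refill of the rest of the row by one left-to-right pass
-- per row tracking the last nonzero column and value (objective: faster, asymptotic).

-- ===== PORT A =====
-- literal transliteration of A: copy the grid, then for each r, for each c with
-- grid[r][c] != 0, rewrite output[r][c..cols-1] with the alternating pattern.
def transform (grid : List (List Int)) : List (List Int) :=
  match grid with
  | [] => []
  | g0 :: _ =>
    if g0.isEmpty then []
    else
      let rows := grid.length
      let cols := g0.length
      let output := grid.map (fun row => row)
      (List.range rows).foldl (fun output r =>
        (List.range cols).foldl (fun output c =>
          if (grid.getD r []).getD c 0 ≠ 0 then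
            let k := (grid.getD r []).getD c 0
            (List.range' c (cols - c)).foldl (fun output pos =>
              output.set r ((output.getD r []).set pos
                (if (pos - c) % 2 = 0 then k else 5))) output
          else output) output) output

-- ===== PORT B =====
-- literal transliteration of B: per row, one pass with state (new, (last_c, last_k)).
def transform_alt (grid : List (List Int)) : List (List Int) :=
  match grid with
  | [] => []
  | g0 :: _ =>
    if g0.isEmpty then []
    else
      let cols := g0.length
      grid.map (fun row =>
        ((List.range cols).foldl
          (fun (st : List Int × Option Nat × Int) c =>
            let v := row.getD c 0
            let st2 : Option Nat × Int := if v ≠ 0 then (some c, v) else st.2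
            match st2.1 with
            | none => (st.1, st2)
            | some lc => (st.1.set c (if (c - lc) % 2 = 0 then st2.2 else 5), st2))
          (row, (none, 0))).1)

-- ===== PRECONDITION & SPEC =====
-- Pre_ excludes exactly the ragged grids on which A raises IndexError (a row
-- shorter than the first row, whose length A uses as the column count).
def Pre_transform (grid : List (List Int)) : Prop :=
  ∀ row ∈ grid, (grid.headD []).length ≤ row.length
instance (grid : List (List Int)) : Decidable (Pre_transform grid) := by
  unfold Pre_transform; infer_instance

def pvWitness_transform : List (List Int) := [[1, 0, 2], [0, 0, 0]]

def Spec_transform (grid : List (List Int)) (out : List (List Int)) : Prop := out = transform_alt grid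
instance (grid : List (List Int)) (out : List (List Int)) : Decidable (Spec_transform grid out) := by unfold Spec_transform; infer_instance

-- ===== CLAIM (what is proved, stated in full; the proofs are below) =====
def Claim_equal_transform : Prop := ∀ (grid : List (List Int)), Dom_transform grid → Pre_transform grid → Spec_transform grid (transform grid)

-- ===== LEMMAS AND PROOFS =====

-- alternating pattern value written from marker column c
def pat (row : List Int) (c pos : Nat) : Int :=
  if (pos - c) % 2 = 0 then row.getD c 0 else 5

-- last nonzero column among indices < m
def lmark (row : List Int) : Nat → Option Nat
  | 0 => none
  | m + 1 => if row.getD m 0 ≠ 0 then some m else lmark row m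

-- one step of A's c-loop, acting on a single row
def aStep (row : List Int) (cols : Nat) (w : List Int) (c : Nat) : List Int :=
  if row.getD c 0 ≠ 0 then
    (List.range' c (cols - c)).foldl (fun w2 pos => w2.set pos (pat row c pos)) w
  else w

def aRow (row : List Int) (cols m : Nat) : List Int :=
  (List.range m).foldl (aStep row cols) row

-- one step of B's c-loop (state: current row, (last_c, last_k))
def bStep (row : List Int) (st : List Int × Option Nat × Int) (c : Nat) :
    List Int × Option Nat × Int :=
  let v := row.getD c 0
  let st2 : Option Nat × Int := if v ≠ 0 then (some c, v) else st.2
  match st2.1 with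
  | none => (st.1, st2)
  | some lc => (st.1.set c (if (c - lc) % 2 = 0 then st2.2 else 5), st2)

def bState (row : List Int) (m : Nat) : List Int × Option Nat × Int :=
  (List.range m).foldl (bStep row) (row, (none, 0))

-- A's inner two loops at row r, on the whole output grid
def cFoldGrid (grid : List (List Int)) (cols r : Nat) (cs : List Nat)
    (out : List (List Int)) : List (List Int) :=
  cs.foldl (fun output c =>
    if (grid.getD r []).getD c 0 ≠ 0 then
      (List.range' c (cols - c)).foldl (fun output pos =>
        output.set r ((output.getD r []).set pos
          (if (pos - c) % 2 = 0 then (grid.getD r []).getD c 0 else 5))) output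
    else output) out

-- pointwise value of a left-to-right fill of positions a..a+n-1
lemma fill_getElem? (v : Nat → Int) :
    ∀ (n a : Nat) (l : List Int), a + n ≤ l.length → ∀ p,
    ((List.range' a n).foldl (fun w pos => w.set pos (v pos)) l)[p]? =
      if a ≤ p ∧ p < a + n then some (v p) else l[p]? := by
  intro n
  induction n with
  | zero => intro a l _ p; simp
  | succ n ih =>
    intro a l hlen p
    rw [List.range'_succ, List.foldl_cons]
    rw [ih (a + 1) (l.set a (v a)) (by simpa using by omega) p]
    rw [List.getElem?_set]
    rcases Nat.lt_trichotomy p a with h | h | h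
    · rw [if_neg (by omega), if_neg (by omega), if_neg (by omega)]
    · subst h
      rw [if_neg (by omega), if_pos rfl, if_pos (by omega), if_pos (by omega)]
    · by_cases h2 : p < a + (n + 1)
      · rw [if_pos (by omega), if_pos (by omega)]
      · rw [if_neg (by omega), if_neg (by omega), if_neg (by omega)]

lemma fill_length (v : Nat → Int) :
    ∀ (n a : Nat) (l : List Int),
    ((List.range' a n).foldl (fun w pos => w.set pos (v pos)) l).length = l.length := by
  intro n
  induction n with
  | zero => intro a l; simp
  | succ n ih => intro a l; rw [List.range'_succ, List.foldl_cons, ih]; simp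

lemma aStep_length (row : List Int) (cols : Nat) (w : List Int) (c : Nat) :
    (aStep row cols w c).length = w.length := by
  unfold aStep; split
  · exact fill_length _ _ _ _
  · rfl

lemma aRow_length (row : List Int) (cols m : Nat) :
    (aRow row cols m).length = row.length := by
  induction m with
  | zero => rfl
  | succ m ih =>
    unfold aRow at *
    rw [List.range_succ, List.foldl_append, List.foldl_cons, List.foldl_nil,
      aStep_length, ih]

-- characterization of A's per-row result after scanning columns < m
lemma aRow_getElem? (row : List Int) (cols : Nat) (hc : cols ≤ row.length) :
    ∀ m, m ≤ cols → ∀ p,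
    (aRow row cols m)[p]? =
      match lmark row (min m (p + 1)) with
      | none => row[p]?
      | some lc => if p < cols then some (pat row lc p) else row[p]? := by
  intro m
  induction m with
  | zero => intro _ p; simp [aRow, lmark]
  | succ m ih =>
    intro hm p
    have hm' : m ≤ cols := by omega
    unfold aRow
    rw [List.range_succ, List.foldl_append, List.foldl_cons, List.foldl_nil]
    have hprev := ih hm'
    by_cases h0 : row.getD m 0 ≠ 0
    · -- marker at column m: refill positions m..cols-1
      have : aStep row cols (aRow row cols m) m =
          (List.range' m (cols - m)).foldl (fun w2 pos => w2.set pos (pat row m pos))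
            (aRow row cols m) := by unfold aStep; rw [if_pos h0]
      rw [show (List.range m).foldl (aStep row cols) row = aRow row cols m from rfl, this]
      rw [fill_getElem? _ _ _ _ (by rw [aRow_length]; omega) p]
      rcases Nat.lt_trichotomy p m with hpm | hpm | hpm
      · -- p before the marker: untouched, same last marker
        rw [if_neg (by omega), hprev p]
        have : min (m + 1) (p + 1) = min m (p + 1) := by omega
        rw [this]
      · subst hpm
        have hmin : min (p + 1) (p + 1) = p + 1 := by omega
        rw [if_pos (by omega), hmin]
        simp only [lmark, if_pos h0]
        rw [if_pos (by omega : p < cols)]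
      · -- p after the marker
        have hmin : min (m + 1) (p + 1) = m + 1 := by omega
        rw [hmin]
        simp only [lmark, if_pos h0]
        by_cases hpc : p < cols
        · rw [if_pos (by omega), if_pos hpc]
        · rw [if_neg (by omega), if_neg hpc, hprev p]
          rcases hE : lmark row (min m (p + 1)) with _ | lc
          · rfl
          · simp [hpc]
    · -- no marker at m: step is the identity
      have : aStep row cols (aRow row cols m) m = aRow row cols m := by
        unfold aStep; rw [if_neg h0]
      rw [show (List.range m).foldl (aStep row cols) row = aRow row cols m from rfl, this,
        hprev p]
      rcases Nat.lt_or_ge p m with hpm | hpm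
      · have : min (m + 1) (p + 1) = min m (p + 1) := by omega
        rw [this]
      · have hmin1 : min (m + 1) (p + 1) = m + 1 := by omega
        have hmin2 : min m (p + 1) = m := by omega
        rw [hmin1, hmin2]
        simp only [lmark]
        rw [if_neg h0]

-- invariant of B's single pass after m steps
lemma bState_inv (row : List Int) :
    ∀ m, m ≤ row.length →
    (bState row m).2.1 = lmark row m ∧
    (bState row m).2.2 = (match lmark row m with
                          | none => (0 : Int)
                          | some lc => row.getD lc 0) ∧
    (bState row m).1.length = row.length ∧
    (∀ p, (bState row m).1[p]? =
      if p < m then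
        (match lmark row (p + 1) with
         | none => row[p]?
         | some lc => some (pat row lc p))
      else row[p]?) := by
  intro m
  induction m with
  | zero =>
    intro _
    refine ⟨rfl, rfl, rfl, ?_⟩
    intro p; simp [bState]
  | succ m ih =>
    intro hm
    obtain ⟨h1, h2, h3, h4⟩ := ih (by omega)
    have hstep : bState row (m + 1) = bStep row (bState row m) m := by
      unfold bState
      rw [List.range_succ, List.foldl_append, List.foldl_cons, List.foldl_nil]
    by_cases h0 : row.getD m 0 ≠ 0
    · -- marker at m: last_c becomes m
      have hlm : lmark row (m + 1) = some m := by simp only [lmark, if_pos h0]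
      have hb : bStep row (bState row m) m =
          ((bState row m).1.set m (if (m - m) % 2 = 0 then row.getD m 0 else 5),
            (some m, row.getD m 0)) := by
        unfold bStep
        simp only [if_pos h0]
      rw [hstep, hb]
      refine ⟨by simp [hlm], by simp [hlm], by simp [h3], ?_⟩
      intro p
      rw [List.getElem?_set]
      by_cases hpm : m = p
      · subst hpm
        rw [if_pos rfl, if_pos (by rw [h3]; omega), if_pos (by omega), hlm]
        simp [pat]
      · rw [if_neg hpm, h4 p]
        rcases Nat.lt_or_ge p m with h | h
        · rw [if_pos h, if_pos (by omega)]
        · rw [if_neg (by omega), if_neg (by omega)]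
    · -- no marker at m
      have hlm : lmark row (m + 1) = lmark row m := by
        simp only [lmark]; rw [if_neg h0]
      rcases hE : lmark row m with _ | lc
      · -- last_c still None: nothing is written
        have hb : bStep row (bState row m) m = ((bState row m).1, (bState row m).2) := by
          unfold bStep
          simp only [if_neg h0]
          rw [h1, hE]
        rw [hstep, hb, hlm, hE]
        refine ⟨h1.trans hE, by rw [h2, hE], h3, ?_⟩
        intro p
        rw [h4 p]
        rcases Nat.lt_or_ge p m with h | h
        · rw [if_pos h, if_pos (by omega)]
        · rw [if_neg (by omega)]
          by_cases hpm : p = m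
          · subst hpm
            rw [if_pos (by omega), hlm, hE]
          · rw [if_neg (by omega)]
      · -- last_c = some lc: B keeps extending the pattern from lc
        have hk : (bState row m).2.2 = row.getD lc 0 := by rw [h2, hE]
        have hb : bStep row (bState row m) m =
            ((bState row m).1.set m (if (m - lc) % 2 = 0 then (bState row m).2.2 else 5),
              (bState row m).2) := by
          unfold bStep
          simp only [if_neg h0]
          rw [h1, hE]
        rw [hstep, hb, hlm, hE]
        refine ⟨h1.trans hE, by rw [h2, hE], by simp [h3], ?_⟩
        intro p
        rw [List.getElem?_set]
        by_cases hpm : m = p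
        · subst hpm
          have hmlen : m < (bState row m).1.length := by rw [h3]; omega
          have hmsucc : m < m + 1 := by omega
          rw [if_pos rfl, if_pos hmlen, if_pos hmsucc, hlm, hE, hk]
          simp [pat]
        · rw [if_neg hpm, h4 p]
          rcases Nat.lt_or_ge p m with h | h
          · rw [if_pos h, if_pos (by omega)]
          · rw [if_neg (by omega), if_neg (by omega)]

-- final per-row agreement
lemma row_eq (row : List Int) (cols : Nat) (hc : cols ≤ row.length) :
    aRow row cols cols = (bState row cols).1 := by
  obtain ⟨h1, h2, h3, h4⟩ := bState_inv row cols hc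
  apply List.ext_getElem?
  intro p
  rw [aRow_getElem? row cols hc cols (le_refl _) p, h4 p]
  rcases Nat.lt_or_ge p cols with h | h
  · have hmin : min cols (p + 1) = p + 1 := by omega
    rw [hmin, if_pos h]
    rcases hE : lmark row (p + 1) with _ | lc
    · rfl
    · simp [h]
  · have hmin : min cols (p + 1) = cols := by omega
    rw [hmin, if_neg (by omega)]
    rcases hE : lmark row cols with _ | lc
    · rfl
    · simp [show ¬ p < cols by omega]

-- a fold of row-r writes commutes to a single set at r
lemma fillGrid_set (r : Nat) (v : Nat → Int) :
    ∀ (ps : List Nat) (out : List (List Int)), r < out.length →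
    ps.foldl (fun o pos => o.set r ((o.getD r []).set pos (v pos))) out
      = out.set r (ps.foldl (fun w pos => w.set pos (v pos)) (out.getD r [])) := by
  intro ps
  induction ps with
  | nil =>
    intro out hr
    simp only [List.foldl_nil]
    rw [List.getD_eq_getElem?_getD, List.getElem?_eq_getElem hr]
    exact (List.set_getElem_self hr).symm
  | cons p ps ih =>
    intro out hr
    rw [List.foldl_cons, List.foldl_cons,
      ih (out.set r ((out.getD r []).set p (v p))) (by simpa using hr)]
    rw [List.set_set]
    congr 1
    rw [List.getD_eq_getElem?_getD, List.getElem?_set, if_pos rfl, if_pos hr]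
    rfl

-- A's c-loop at row r commutes to a single set at r of the per-row fold
lemma cFold_set (grid : List (List Int)) (cols r : Nat) :
    ∀ (cs : List Nat) (out : List (List Int)), r < out.length →
    cFoldGrid grid cols r cs out
      = out.set r (cs.foldl (aStep (grid.getD r []) cols) (out.getD r [])) := by
  intro cs
  induction cs with
  | nil =>
    intro out hr
    unfold cFoldGrid
    simp only [List.foldl_nil]
    rw [List.getD_eq_getElem?_getD, List.getElem?_eq_getElem hr]
    exact (List.set_getElem_self hr).symm
  | cons c cs ih =>
    intro out hr
    unfold cFoldGrid
    rw [List.foldl_cons]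
    by_cases h0 : (grid.getD r []).getD c 0 ≠ 0
    · rw [if_pos h0]
      have hfill := fillGrid_set r (fun pos => if (pos - c) % 2 = 0 then (grid.getD r []).getD c 0 else 5) (List.range' c (cols - c)) out hr
      rw [hfill]
      have := ih (out.set r ((List.range' c (cols - c)).foldl (fun w pos => w.set pos (if (pos - c) % 2 = 0 then (grid.getD r []).getD c 0 else 5)) (out.getD r []))) (by simpa using hr)
      unfold cFoldGrid at this
      rw [this, List.set_set]
      congr 1
      rw [List.foldl_cons]
      congr 1
      rw [List.getD_eq_getElem?_getD, List.getElem?_set, if_pos rfl, if_pos hr]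
      unfold aStep
      rw [if_pos h0]
      rfl
    · rw [if_neg h0]
      have := ih out hr
      unfold cFoldGrid at this
      rw [this, List.foldl_cons]
      congr 2
      unfold aStep
      rw [if_neg h0]

-- the outer r-loop: each row j < n becomes aRow of the original row
lemma rFold (grid : List (List Int)) (cols : Nat) :
    ∀ (n : Nat) (out : List (List Int)), n ≤ out.length →
    ((List.range n).foldl (fun o r => cFoldGrid grid cols r (List.range cols) o) out).length
        = out.length ∧
    ∀ j, ((List.range n).foldl (fun o r => cFoldGrid grid cols r (List.range cols) o) out)[j]?
        = if j < n then
            some ((List.range cols).foldl (aStep (grid.getD j []) cols) (out.getD j []))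
          else out[j]? := by
  intro n
  induction n with
  | zero => intro out _; exact ⟨rfl, by intro j; simp⟩
  | succ n ih =>
    intro out hn
    obtain ⟨hlen, hget⟩ := ih out (by omega)
    rw [List.range_succ, List.foldl_append, List.foldl_cons, List.foldl_nil]
    have hr : n < ((List.range n).foldl (fun o r => cFoldGrid grid cols r (List.range cols) o) out).length := by omega
    rw [cFold_set grid cols n (List.range cols) _ hr]
    constructor
    · simp [hlen]
    · intro j
      rw [List.getElem?_set]
      have hgd : ((List.range n).foldl (fun o r => cFoldGrid grid cols r (List.range cols) o) out).getD n [] = out.getD n [] := by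
        rw [List.getD_eq_getElem?_getD, List.getD_eq_getElem?_getD, hget n, if_neg (by omega)]
      by_cases hj : n = j
      · subst hj
        rw [if_pos rfl, if_pos hr, if_pos (by omega), hgd]
      · rw [if_neg hj, hget j]
        rcases Nat.lt_or_ge j n with h | h
        · rw [if_pos h, if_pos (by omega)]
        · rw [if_neg (by omega), if_neg (by omega)]

-- ===== VERDICT (by name: the statement is the Claim_ definition above) =====
theorem transform_spec : Claim_equal_transform := by
  intro grid _ hpre
  unfold Spec_transform
  cases grid with
  | nil => rfl
  | cons g0 rest =>
    by_cases hg : g0.isEmpty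
    · simp only [transform, transform_alt, if_pos hg]
    · simp only [transform, transform_alt, if_neg hg]
      show (List.range (g0 :: rest).length).foldl
          (fun o r => cFoldGrid (g0 :: rest) g0.length r (List.range g0.length) o)
          ((g0 :: rest).map (fun row => row))
        = (g0 :: rest).map (fun row => (bState row g0.length).1)
      rw [List.map_id']
      obtain ⟨hlen, hget⟩ :=
        rFold (g0 :: rest) g0.length (g0 :: rest).length (g0 :: rest) (le_refl _)
      apply List.ext_getElem?
      intro j
      rw [hget j, List.getElem?_map]
      by_cases hj : j < (g0 :: rest).length
      · rw [if_pos hj, List.getElem?_eq_getElem hj]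
        have hc : g0.length ≤ ((g0 :: rest)[j]).length := by
          simpa using hpre _ (List.getElem_mem hj)
        have hgd : (g0 :: rest).getD j [] = (g0 :: rest)[j] := by
          rw [List.getD_eq_getElem?_getD, List.getElem?_eq_getElem hj]; rfl
        rw [hgd]
        rw [show (List.range g0.length).foldl (aStep ((g0 :: rest)[j]) g0.length)
              ((g0 :: rest)[j]) = aRow ((g0 :: rest)[j]) g0.length g0.length from rfl]
        rw [row_eq _ _ hc]
        rfl
      · rw [if_neg hj, List.getElem?_eq_none (by omega)]
        rfl
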